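-- pv_equiv track=rewrite | github.com/wwg135/hermes-webui | api/routes.py | _cron_output_snippet
-- ===== SOURCE A (Python) =====
-- def _cron_output_snippet(text: str, limit: int = 600) -> str:
--     """Extract the response body from a cron output .md file for preview.
--
--     Contract: cron output files use markdown front-matter followed by a
--     ``## Response`` (or ``# Response``) heading that marks the start of the
--     agent's reply.  This function locates that heading and returns everything
--     after it (up to *limit* chars).  If no heading is found the entire text
--     is returned — callers should be aware that front-matter fields (model,
--     timestamp, …) may appear in the snippet.
--     """
--     lines = text.split("\n")
--     response_idx = -1
--     for i, line in enumerate(lines):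
--         if line.startswith("## Response") or line.startswith("# Response"):
--             response_idx = i
--             break
--     body = ("\n".join(lines[response_idx + 1:]) if response_idx >= 0 else "\n".join(lines)).strip()
--     return body[:limit] or "(empty)"
-- ===== SOURCE B (Python) =====
-- def _cron_output_snippet(text: str, limit: int = 600) -> str:
--     # Walk suffixes of the raw string instead of building a list of lines:
--     # no split, no join, no index bookkeeping.
--     rest = text
--     while True:
--         if rest.startswith("## Response") or rest.startswith("# Response"):
--             nl = rest.find("\n")
--             body = rest[nl + 1:] if nl != -1 else ""
--             break
--         nl = rest.find("\n")
--         if nl == -1: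
--             body = text
--             break
--         rest = rest[nl + 1:]
--     body = body.strip()
--     return body[:limit] or "(empty)"
-- ===== Notes on version B (the rewrite author's own statement) =====
-- stated objective: simpler
-- what changed: B scans suffixes of the raw string with startswith/find and slices once past the heading's newline, instead of A's split into a list of lines, indexed scan, list slice and ' '.join; no line list is ever built or rejoined.
import Mathlib
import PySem

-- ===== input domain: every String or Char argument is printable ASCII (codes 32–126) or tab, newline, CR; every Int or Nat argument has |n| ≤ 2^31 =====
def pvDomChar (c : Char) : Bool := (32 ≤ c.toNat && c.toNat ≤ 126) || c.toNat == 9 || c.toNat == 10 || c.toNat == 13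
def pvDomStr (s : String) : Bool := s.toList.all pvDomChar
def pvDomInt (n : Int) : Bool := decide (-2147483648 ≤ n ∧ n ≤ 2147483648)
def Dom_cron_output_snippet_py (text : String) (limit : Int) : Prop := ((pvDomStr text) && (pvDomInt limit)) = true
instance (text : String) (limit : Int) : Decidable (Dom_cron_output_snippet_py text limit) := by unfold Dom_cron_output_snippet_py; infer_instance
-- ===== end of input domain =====

-- B walks suffixes of the raw string (startswith/find/slice on positions) instead of
-- splitting into a list of lines, scanning indices and rejoining — simpler, no list building.


-- ===== PORT A =====
-- the enumerate-with-break loop: first index (counting from i) of a line starting with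
-- "## Response" or "# Response"; -1 if none (Python's response_idx sentinel)
def pvAScan : List (List Char) → Int → Int
  | [], _ => -1
  | l :: ls, i =>
    if PySem.Chars.startswith l "## Response".toList || PySem.Chars.startswith l "# Response".toList
    then i else pvAScan ls (i + 1)

def cron_output_snippet_py (text : String) (limit : Int) : String :=
  let lines := PySem.Chars.splitOn text.toList ['\n']
  let responseIdx := pvAScan lines 0
  let body := PySem.Chars.strip
    (if responseIdx ≥ 0
     then PySem.Chars.join ['\n'] (PySem.List.slice lines (some (responseIdx + 1)) none)
     else PySem.Chars.join ['\n'] lines)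
  let r := PySem.Chars.slice body none (some limit)
  if r = [] then "(empty)" else String.ofList r

-- ===== PORT B =====
-- B's while-loop over suffixes of the raw text: rest is always a suffix; on a heading hit
-- take everything after the next newline, otherwise advance past the next newline.
def pvBLoop (text : List Char) (rest : List Char) : List Char :=
  if PySem.Chars.startswith rest "## Response".toList || PySem.Chars.startswith rest "# Response".toList then
    let nl := PySem.Chars.find rest ['\n']
    if nl ≠ -1 then PySem.Chars.slice rest (some (nl + 1)) none else []
  else
    let nl := PySem.Chars.find rest ['\n']
    if h : nl = -1 then text
    else pvBLoop text (PySem.Chars.slice rest (some (nl + 1)) none)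
termination_by rest.length
decreasing_by
  have h0 : 0 ≤ PySem.Chars.find rest ['\n'] := by
    rcases (PySem.Chars.neg_one_le_find rest ['\n']).lt_or_eq with hlt | heq
    · omega
    · exact absurd heq.symm h
  have hne : rest ≠ [] := by
    intro hc
    have := (PySem.Chars.find_nonneg_iff rest ['\n']).mp h0
    rw [hc] at this
    simp at this
  have hlen : 0 < rest.length := List.length_pos_iff.mpr hne
  simp only [PySem.Chars.slice_eq_listSlice,
    PySem.List.slice_from rest (by omega : (0:Int) ≤ PySem.Chars.find rest ['\n'] + 1),
    List.length_drop]
  omega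

def cron_output_snippet_py_alt (text : String) (limit : Int) : String :=
  let body := PySem.Chars.strip (pvBLoop text.toList text.toList)
  let r := PySem.Chars.slice body none (some limit)
  if r = [] then "(empty)" else String.ofList r

-- ===== PRECONDITION & SPEC =====
def Spec_cron_output_snippet_py (text : String) (limit : Int) (out : String) : Prop := out = cron_output_snippet_py_alt text limit
instance (text : String) (limit : Int) (out : String) : Decidable (Spec_cron_output_snippet_py text limit out) := by unfold Spec_cron_output_snippet_py; infer_instance

-- ===== CLAIM (what is proved, stated in full; the proofs are below) =====
def Claim_equal_cron_output_snippet_py : Prop := ∀ (text : String) (limit : Int), Dom_cron_output_snippet_py text limit → Spec_cron_output_snippet_py text limit (cron_output_snippet_py text limit)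

-- ===== LEMMAS AND PROOFS =====

-- proof-side structural model of text.split("\n")
def pvSplitNl : List Char → List (List Char)
  | [] => [[]]
  | c :: r =>
    if c = '\n' then [] :: pvSplitNl r
    else match pvSplitNl r with
      | [] => [[c]]
      | p :: ps => (c :: p) :: ps

lemma pvSplitNl_ne_nil (l : List Char) : pvSplitNl l ≠ [] := by
  cases l with
  | nil => simp [pvSplitNl]
  | cons c r =>
    simp only [pvSplitNl]
    split_ifs
    · simp
    · cases h : pvSplitNl r <;> simp

lemma pvSplitOn_go_spec (l : List Char) : ∀ (fuel : Nat) (cur : List Char) (acc : List (List Char)),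
    l.length ≤ fuel →
    PySem.Chars.splitOn.go ['\n'] fuel l cur acc
      = acc.reverse ++ (match pvSplitNl l with
        | [] => [cur.reverse]
        | p :: ps => (cur.reverse ++ p) :: ps) := by
  induction l with
  | nil =>
    intro fuel cur acc _
    cases fuel <;> simp [PySem.Chars.splitOn.go, pvSplitNl]
  | cons c r ih =>
    intro fuel cur acc hf
    cases fuel with
    | zero => simp at hf
    | succ f =>
      simp only [PySem.Chars.splitOn.go]
      by_cases hc : c = '\n'
      · subst hc
        have hpre : List.isPrefixOf ['\n'] ('\n' :: r) = true := by simp [List.isPrefixOf]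
        rw [if_pos hpre]
        simp only [List.length_cons] at hf
        rw [show List.drop (['\n'] : List Char).length ('\n'::r) = r from rfl]
        rw [ih f [] (cur.reverse :: acc) (by omega)]
        cases h : pvSplitNl r with
        | nil => exact absurd h (pvSplitNl_ne_nil r)
        | cons p ps => simp [pvSplitNl, h]
      · have hpre : List.isPrefixOf ['\n'] (c :: r) = false := by
          simp [List.isPrefixOf]
          exact fun h => hc h.symm
        rw [if_neg (by simp [hpre])]
        simp only [List.length_cons] at hf
        rw [ih f (c :: cur) acc (by omega)]
        simp only [pvSplitNl, if_neg hc]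
        cases h : pvSplitNl r with
        | nil => simp
        | cons p ps => simp

lemma pvSplitOn_eq (cs : List Char) : PySem.Chars.splitOn cs ['\n'] = pvSplitNl cs := by
  unfold PySem.Chars.splitOn
  rw [pvSplitOn_go_spec cs (cs.length + 1) [] [] (by omega)]
  cases h : pvSplitNl cs with
  | nil => exact absurd h (pvSplitNl_ne_nil cs)
  | cons p ps => simp

lemma pvSplitNl_no_nl (l : List Char) : ∀ p ∈ pvSplitNl l, '\n' ∉ p := by
  induction l with
  | nil => simp [pvSplitNl]
  | cons c r ih =>
    simp only [pvSplitNl]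
    split_ifs with hc
    · intro p hp
      rcases List.mem_cons.mp hp with h | h
      · simp [h]
      · exact ih p h
    · cases h : pvSplitNl r with
      | nil => exact absurd h (pvSplitNl_ne_nil r)
      | cons q qs =>
        intro p hp
        rcases List.mem_cons.mp hp with h1 | h1
        · subst h1
          intro hmem
          rcases List.mem_cons.mp hmem with h2 | h2
          · exact hc h2.symm
          · exact ih q (by simp [h]) h2
        · exact ih p (by simp [h, h1])

lemma pvIntercalate_cons (a : List Char) (qs : List (List Char)) (hq : qs ≠ []) :
    List.intercalate ['\n'] (a :: qs) = a ++ '\n' :: List.intercalate ['\n'] qs := by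
  cases qs with
  | nil => exact absurd rfl hq
  | cons b t => simp [List.intercalate, List.intersperse]

lemma pvIntercalate_pvSplitNl (l : List Char) : List.intercalate ['\n'] (pvSplitNl l) = l := by
  induction l with
  | nil => simp [pvSplitNl, List.intercalate]
  | cons c r ih =>
    simp only [pvSplitNl]
    split_ifs with hc
    · subst hc
      rw [pvIntercalate_cons [] (pvSplitNl r) (pvSplitNl_ne_nil r)]
      simp [ih]
    · cases h : pvSplitNl r with
      | nil => exact absurd h (pvSplitNl_ne_nil r)
      | cons q qs =>
        rw [h] at ih
        cases qs with
        | nil => simp [List.intercalate] at ih ⊢; simp [ih]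
        | cons b t =>
          rw [pvIntercalate_cons (c::q) (b::t) (by simp)]
          rw [pvIntercalate_cons q (b::t) (by simp)] at ih
          simp [← ih]

lemma pvStartswith_line (l r P : List Char) (hP : '\n' ∉ P) :
    PySem.Chars.startswith (l ++ '\n' :: r) P = PySem.Chars.startswith l P := by
  have hiff : P <+: (l ++ '\n' :: r) ↔ P <+: l := by
    constructor
    · intro h
      by_cases hlen : P.length ≤ l.length
      · have := List.prefix_iff_eq_take.mp h
        rw [List.take_append_of_le_length hlen] at this
        exact this ▸ List.take_prefix _ _
      · exfalso
        have hl : l.length < P.length := by omega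
        have h1 : P[l.length]'hl = (l ++ '\n' :: r)[l.length]'(by simp) := List.IsPrefix.getElem h hl
        have h2 : (l ++ '\n' :: r)[l.length]'(by simp) = '\n' := by
          simp [List.getElem_append_right (Nat.le_refl l.length)]
        exact hP (h2 ▸ h1 ▸ List.getElem_mem hl)
    · intro h
      exact h.trans (List.prefix_append l ('\n' :: r))
  simp only [PySem.Chars.startswith]
  rw [Bool.eq_iff_iff]
  simpa [List.isPrefixOf_iff_prefix] using hiff

lemma pvFind_no_newline (l : List Char) (h : '\n' ∉ l) :
    PySem.Chars.find l ['\n'] = -1 := by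
  rw [PySem.Chars.find_eq_neg_one_iff]
  intro hinf
  exact h ((List.singleton_infix_iff '\n' l).mp hinf)

lemma pvFind_newline (l r : List Char) (h : '\n' ∉ l) :
    PySem.Chars.find (l ++ '\n' :: r) ['\n'] = (l.length : Int) := by
  have hinf : ['\n'] <:+: (l ++ '\n' :: r) := ⟨l, r, by simp⟩
  have h0 : 0 ≤ PySem.Chars.find (l ++ '\n' :: r) ['\n'] :=
    (PySem.Chars.find_nonneg_iff _ _).mpr hinf
  obtain ⟨hpre, hmin⟩ := PySem.Chars.find_spec h0
  set n := (PySem.Chars.find (l ++ '\n' :: r) ['\n']).toNat with hn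
  have hcases : n = l.length := by
    rcases lt_trichotomy n l.length with hlt | heq | hgt
    · exfalso
      obtain ⟨t, ht⟩ := hpre
      have hdrop : (l ++ '\n' :: r).drop n = '\n' :: t := ht.symm ▸ rfl
      have hlt' : n < (l ++ '\n' :: r).length := by simp; omega
      have hat : (l ++ '\n' :: r)[n]'hlt' = '\n' := by
        have h0' : ((l ++ '\n' :: r).drop n)[0]'(by rw [hdrop]; simp) = '\n' := by simp [hdrop]
        simpa using h0'
      have : '\n' ∈ l := by
        rw [List.getElem_append_left hlt] at hat
        exact hat ▸ List.getElem_mem hlt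
      exact h this
    · exact heq
    · exact absurd (by rw [show (l ++ '\n' :: r) = (l ++ ('\n' :: r)) from rfl, List.drop_left]; exact ⟨r, rfl⟩) (hmin l.length hgt)
  have := Int.toNat_of_nonneg h0
  omega

-- first hit, returning the suffix of lines after the hit line
def pvFirstHit : List (List Char) → Option (List (List Char))
  | [] => none
  | l :: ls =>
    if PySem.Chars.startswith l "## Response".toList || PySem.Chars.startswith l "# Response".toList
    then some ls else pvFirstHit ls

lemma pvAScan_none (ls : List (List Char)) (h : pvFirstHit ls = none) :
    ∀ i : Int, pvAScan ls i = -1 := by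
  induction ls with
  | nil => intro i; simp [pvAScan]
  | cons l t ih =>
    intro i
    simp only [pvFirstHit] at h
    simp only [pvAScan]
    split_ifs with hc
    · rw [if_pos hc] at h; exact absurd h (by simp)
    · rw [if_neg hc] at h; exact ih h (i + 1)

lemma pvAScan_some (ls : List (List Char)) (suf : List (List Char)) (h : pvFirstHit ls = some suf) :
    ∀ i : Nat, ∃ k : Nat, pvAScan ls ((i : Nat) : Int) = ((i + k : Nat) : Int) ∧ ls.drop (k + 1) = suf := by
  induction ls with
  | nil => simp [pvFirstHit] at h
  | cons l t ih =>
    intro i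
    simp only [pvFirstHit] at h
    simp only [pvAScan]
    split_ifs with hc
    · rw [if_pos hc] at h
      exact ⟨0, by simp, by simpa using (Option.some_inj.mp h)⟩
    · rw [if_neg hc] at h
      obtain ⟨k, hk1, hk2⟩ := ih h (i + 1)
      refine ⟨k + 1, ?_, by simpa using hk2⟩
      have : ((i : Nat) : Int) + 1 = ((i + 1 : Nat) : Int) := by push_cast; ring
      rw [this, hk1]
      congr 1
      omega

lemma pvBLoop_spec (text : List Char) (ls : List (List Char)) (hne : ls ≠ [])
    (h : ∀ p ∈ ls, '\n' ∉ p) :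
    pvBLoop text (List.intercalate ['\n'] ls)
      = (match pvFirstHit ls with
         | some suf => List.intercalate ['\n'] suf
         | none => text) := by
  induction ls with
  | nil => exact absurd rfl hne
  | cons l t ih =>
    have hl : '\n' ∉ l := h l (by simp)
    cases t with
    | nil =>
      rw [show List.intercalate ['\n'] [l] = l by simp [List.intercalate]]
      rw [pvBLoop]
      simp only [pvFirstHit, pvFind_no_newline l hl]
      by_cases hc : (PySem.Chars.startswith l "## Response".toList || PySem.Chars.startswith l "# Response".toList) = true
      · simp only [if_pos hc]
        rw [if_neg (show ¬((-1:Int) ≠ -1) by simp)]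
        simp [List.intercalate]
      · simp only [if_neg hc]
        simp
    | cons b t2 =>
      rw [pvIntercalate_cons l (b :: t2) (by simp)]
      rw [pvBLoop]
      have hs1 : PySem.Chars.startswith (l ++ '\n' :: List.intercalate ['\n'] (b :: t2)) "## Response".toList
          = PySem.Chars.startswith l "## Response".toList := pvStartswith_line _ _ _ (by decide)
      have hs2 : PySem.Chars.startswith (l ++ '\n' :: List.intercalate ['\n'] (b :: t2)) "# Response".toList
          = PySem.Chars.startswith l "# Response".toList := pvStartswith_line _ _ _ (by decide)
      have hf : PySem.Chars.find (l ++ '\n' :: List.intercalate ['\n'] (b :: t2)) ['\n'] = (l.length : Int) :=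
        pvFind_newline _ _ hl
      have hdrop : PySem.Chars.slice (l ++ '\n' :: List.intercalate ['\n'] (b :: t2)) (some ((l.length : Int) + 1)) none
          = List.intercalate ['\n'] (b :: t2) := by
        simp only [PySem.Chars.slice_eq_listSlice,
          PySem.List.slice_from _ (by omega : (0:Int) ≤ (l.length : Int) + 1)]
        have : ((l.length : Int) + 1).toNat = l.length + 1 := by omega
        rw [this]
        rw [show l.length + 1 = (l ++ ['\n']).length by simp,
          show l ++ '\n' :: List.intercalate ['\n'] (b :: t2) = (l ++ ['\n']) ++ List.intercalate ['\n'] (b :: t2) by simp,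
          List.drop_left]
      rw [hs1, hs2, hf]
      simp only [pvFirstHit]
      by_cases hc : (PySem.Chars.startswith l "## Response".toList || PySem.Chars.startswith l "# Response".toList) = true
      · simp only [if_pos hc]
        rw [if_pos (show ((l.length : Int) ≠ -1) by omega)]
        simpa using hdrop
      · simp only [if_neg hc]
        rw [dif_neg (show ¬((l.length : Int) = -1) by omega)]
        rw [hdrop]
        exact ih (by simp) (fun p hp => h p (by simp [hp]))

-- ===== VERDICT (by name: the statement is the Claim_ definition above) =====
theorem cron_output_snippet_py_spec : Claim_equal_cron_output_snippet_py := by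
  intro text limit _
  unfold Spec_cron_output_snippet_py cron_output_snippet_py cron_output_snippet_py_alt
  have hsplit := pvSplitOn_eq text.toList
  have hinter := pvIntercalate_pvSplitNl text.toList
  have hnn := pvSplitNl_no_nl text.toList
  have hB := pvBLoop_spec text.toList (pvSplitNl text.toList) (pvSplitNl_ne_nil _) hnn
  rw [hinter] at hB
  simp only [hsplit, hB]
  cases hfh : pvFirstHit (pvSplitNl text.toList) with
  | none =>
    simp only [pvAScan_none _ hfh 0]
    simp only [if_neg (show ¬((-1:Int) ≥ 0) by omega)]
    simp [PySem.Chars.join, hinter]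
  | some suf =>
    obtain ⟨k, hk1, hk2⟩ := pvAScan_some _ _ hfh 0
    rw [show ((0:Nat):Int) = 0 from rfl] at hk1
    rw [show ((0 + k : Nat) : Int) = (k : Int) by omega] at hk1
    simp only [hk1, if_pos (show ((k:Int) ≥ 0) by omega)]
    rw [PySem.List.slice_from _ (by omega : (0:Int) ≤ (k:Int) + 1),
      show ((k:Int) + 1).toNat = k + 1 by omega, hk2]
    simp [PySem.Chars.join]
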